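-- pv_equiv track=rewrite | github.com/mlocke/vfr-api | backend/data_collectors/commercial/mcp/mcp_client.py | _infer_tool_category
-- ===== SOURCE A (Python) =====
-- def _infer_tool_category(tool_name: str, description: str) -> str:
--     """Infer tool category from name and description."""
--     name_lower = tool_name.lower()
--     desc_lower = description.lower()
--
--     # Market data patterns
--     if any(term in name_lower or term in desc_lower for term in [
--         'price', 'quote', 'ohlcv', 'market', 'stock', 'equity', 'trading'
--     ]):
--         return 'market_data'
--
--     # Technical analysis patterns
--     elif any(term in name_lower or term in desc_lower for term in [
--         'rsi', 'sma', 'ema', 'macd', 'bollinger', 'stochastic', 'indicator', 'technical'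
--     ]):
--         return 'technical_analysis'
--
--     # Fundamental data patterns
--     elif any(term in name_lower or term in desc_lower for term in [
--         'earnings', 'revenue', 'balance', 'income', 'cash', 'financial', 'statement'
--     ]):
--         return 'fundamentals'
--
--     # News and sentiment patterns
--     elif any(term in name_lower or term in desc_lower for term in [
--         'news', 'sentiment', 'social', 'article', 'headline', 'buzz'
--     ]):
--         return 'sentiment'
--
--     # Forex patterns
--     elif any(term in name_lower or term in desc_lower for term in [
--         'forex', 'currency', 'exchange', 'fx'
--     ]):
--         return 'forex'
--
--     # Cryptocurrency patterns
--     elif any(term in name_lower or term in desc_lower for term in [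
--         'crypto', 'bitcoin', 'ethereum', 'blockchain', 'digital'
--     ]):
--         return 'cryptocurrency'
--
--     # Options patterns
--     elif any(term in name_lower or term in desc_lower for term in [
--         'option', 'call', 'put', 'strike', 'expiry', 'volatility'
--     ]):
--         return 'options'
--
--     else:
--         return 'general'
-- ===== SOURCE B (Python) =====
-- # One flat keyword table scanned in a single full pass; a min-priority
-- # accumulator picks the best (lowest-priority) matching category, so no
-- # early return and no per-category branching is needed.
-- KEYWORDS = [
--     (0, 'market_data', 'price'), (0, 'market_data', 'quote'), (0, 'market_data', 'ohlcv'),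
--     (0, 'market_data', 'market'), (0, 'market_data', 'stock'), (0, 'market_data', 'equity'),
--     (0, 'market_data', 'trading'),
--     (1, 'technical_analysis', 'rsi'), (1, 'technical_analysis', 'sma'), (1, 'technical_analysis', 'ema'),
--     (1, 'technical_analysis', 'macd'), (1, 'technical_analysis', 'bollinger'),
--     (1, 'technical_analysis', 'stochastic'), (1, 'technical_analysis', 'indicator'),
--     (1, 'technical_analysis', 'technical'),
--     (2, 'fundamentals', 'earnings'), (2, 'fundamentals', 'revenue'), (2, 'fundamentals', 'balance'),
--     (2, 'fundamentals', 'income'), (2, 'fundamentals', 'cash'), (2, 'fundamentals', 'financial'),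
--     (2, 'fundamentals', 'statement'),
--     (3, 'sentiment', 'news'), (3, 'sentiment', 'sentiment'), (3, 'sentiment', 'social'),
--     (3, 'sentiment', 'article'), (3, 'sentiment', 'headline'), (3, 'sentiment', 'buzz'),
--     (4, 'forex', 'forex'), (4, 'forex', 'currency'), (4, 'forex', 'exchange'), (4, 'forex', 'fx'),
--     (5, 'cryptocurrency', 'crypto'), (5, 'cryptocurrency', 'bitcoin'), (5, 'cryptocurrency', 'ethereum'),
--     (5, 'cryptocurrency', 'blockchain'), (5, 'cryptocurrency', 'digital'),
--     (6, 'options', 'option'), (6, 'options', 'call'), (6, 'options', 'put'),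
--     (6, 'options', 'strike'), (6, 'options', 'expiry'), (6, 'options', 'volatility'),
-- ]
--
-- def _infer_tool_category(tool_name: str, description: str) -> str:
--     name_lower = tool_name.lower()
--     desc_lower = description.lower()
--     best = None  # (priority, category) of the best match seen so far
--     for prio, category, term in KEYWORDS:
--         if (term in name_lower or term in desc_lower) and (best is None or prio < best[0]):
--             best = (prio, category)
--     return best[1] if best is not None else 'general'
-- ===== Notes on version B (the rewrite author's own statement) =====
-- stated objective: alternative
-- what changed: A's eight-branch if/elif chain with per-category early return is replaced by a single full pass over one flat (priority, category, keyword) table that keeps a min-priority accumulator of the best match and returns its category at the end.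
import Mathlib
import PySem

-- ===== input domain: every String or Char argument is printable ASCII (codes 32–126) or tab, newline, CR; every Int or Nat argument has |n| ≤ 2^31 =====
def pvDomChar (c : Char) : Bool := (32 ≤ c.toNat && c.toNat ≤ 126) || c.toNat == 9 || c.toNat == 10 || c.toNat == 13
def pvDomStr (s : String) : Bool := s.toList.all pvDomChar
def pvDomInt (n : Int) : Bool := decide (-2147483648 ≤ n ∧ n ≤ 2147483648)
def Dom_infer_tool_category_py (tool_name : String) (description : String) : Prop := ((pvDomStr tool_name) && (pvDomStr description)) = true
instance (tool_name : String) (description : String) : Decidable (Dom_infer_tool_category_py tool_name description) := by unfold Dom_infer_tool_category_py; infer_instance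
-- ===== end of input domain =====

-- B replaces A's eight-branch if/elif chain by one full scan of a flat keyword table with a min-priority accumulator (alternative algorithm, same cost).


-- ===== PORT A =====
def infer_tool_category_py (tool_name : String) (description : String) : String :=
  let name_lower := PySem.Str.lower tool_name
  let desc_lower := PySem.Str.lower description
  if (["price", "quote", "ohlcv", "market", "stock", "equity", "trading"] : List String).any
      (fun term => PySem.Str.isIn term name_lower || PySem.Str.isIn term desc_lower) then
    "market_data"
  else if (["rsi", "sma", "ema", "macd", "bollinger", "stochastic", "indicator", "technical"] : List String).any
      (fun term => PySem.Str.isIn term name_lower || PySem.Str.isIn term desc_lower) then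
    "technical_analysis"
  else if (["earnings", "revenue", "balance", "income", "cash", "financial", "statement"] : List String).any
      (fun term => PySem.Str.isIn term name_lower || PySem.Str.isIn term desc_lower) then
    "fundamentals"
  else if (["news", "sentiment", "social", "article", "headline", "buzz"] : List String).any
      (fun term => PySem.Str.isIn term name_lower || PySem.Str.isIn term desc_lower) then
    "sentiment"
  else if (["forex", "currency", "exchange", "fx"] : List String).any
      (fun term => PySem.Str.isIn term name_lower || PySem.Str.isIn term desc_lower) then
    "forex"
  else if (["crypto", "bitcoin", "ethereum", "blockchain", "digital"] : List String).any
      (fun term => PySem.Str.isIn term name_lower || PySem.Str.isIn term desc_lower) then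
    "cryptocurrency"
  else if (["option", "call", "put", "strike", "expiry", "volatility"] : List String).any
      (fun term => PySem.Str.isIn term name_lower || PySem.Str.isIn term desc_lower) then
    "options"
  else
    "general"

-- ===== PORT B =====
-- the flat KEYWORDS table of Source B: (priority, category, keyword)
def pvKeywords : List (Nat × String × String) :=
  [(0, "market_data", "price"), (0, "market_data", "quote"), (0, "market_data", "ohlcv"),
   (0, "market_data", "market"), (0, "market_data", "stock"), (0, "market_data", "equity"),
   (0, "market_data", "trading"),
   (1, "technical_analysis", "rsi"), (1, "technical_analysis", "sma"), (1, "technical_analysis", "ema"),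
   (1, "technical_analysis", "macd"), (1, "technical_analysis", "bollinger"),
   (1, "technical_analysis", "stochastic"), (1, "technical_analysis", "indicator"),
   (1, "technical_analysis", "technical"),
   (2, "fundamentals", "earnings"), (2, "fundamentals", "revenue"), (2, "fundamentals", "balance"),
   (2, "fundamentals", "income"), (2, "fundamentals", "cash"), (2, "fundamentals", "financial"),
   (2, "fundamentals", "statement"),
   (3, "sentiment", "news"), (3, "sentiment", "sentiment"), (3, "sentiment", "social"),
   (3, "sentiment", "article"), (3, "sentiment", "headline"), (3, "sentiment", "buzz"),
   (4, "forex", "forex"), (4, "forex", "currency"), (4, "forex", "exchange"), (4, "forex", "fx"),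
   (5, "cryptocurrency", "crypto"), (5, "cryptocurrency", "bitcoin"), (5, "cryptocurrency", "ethereum"),
   (5, "cryptocurrency", "blockchain"), (5, "cryptocurrency", "digital"),
   (6, "options", "option"), (6, "options", "call"), (6, "options", "put"),
   (6, "options", "strike"), (6, "options", "expiry"), (6, "options", "volatility")]

-- the body of Source B's for-loop: update the best (lowest-priority) match seen so far
def pvStep (name_lower desc_lower : String) (best : Option (Nat × String)) (p : Nat × String × String) : Option (Nat × String) :=
  if (PySem.Str.isIn p.2.2 name_lower || PySem.Str.isIn p.2.2 desc_lower) &&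
     (match best with | none => true | some b => decide (p.1 < b.1)) then
    some (p.1, p.2.1)
  else best

def infer_tool_category_py_alt (tool_name : String) (description : String) : String :=
  let name_lower := PySem.Str.lower tool_name
  let desc_lower := PySem.Str.lower description
  match pvKeywords.foldl (pvStep name_lower desc_lower) none with
  | none => "general"
  | some b => b.2

-- ===== PRECONDITION & SPEC =====
def Spec_infer_tool_category_py (tool_name : String) (description : String) (out : String) : Prop := out = infer_tool_category_py_alt tool_name description
instance (tool_name : String) (description : String) (out : String) : Decidable (Spec_infer_tool_category_py tool_name description out) := by unfold Spec_infer_tool_category_py; infer_instance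

-- ===== CLAIM (what is proved, stated in full; the proofs are below) =====
def Claim_equal_infer_tool_category_py : Prop := ∀ (tool_name : String) (description : String), Dom_infer_tool_category_py tool_name description → Spec_infer_tool_category_py tool_name description (infer_tool_category_py tool_name description)

-- ===== LEMMAS AND PROOFS =====

-- folding Source B's update over one constant-priority block of the table
lemma pvBlock (nl dl : String) (i : Nat) (cat : String) (terms : List String) (best : Option (Nat × String)) :
    List.foldl (pvStep nl dl) best (terms.map (fun t => (i, cat, t))) =
      if terms.any (fun t => PySem.Str.isIn t nl || PySem.Str.isIn t dl) then
        (match best with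
         | none => some (i, cat)
         | some b => if i < b.1 then some (i, cat) else some b)
      else best := by
  induction terms generalizing best with
  | nil => simp
  | cons t ts ih =>
    simp only [List.map_cons, List.foldl_cons, List.any_cons]
    by_cases hm : (PySem.Str.isIn t nl || PySem.Str.isIn t dl) = true
    · cases best with
      | none =>
        simp only [pvStep, hm, Bool.true_and, Bool.true_or, reduceIte, ih]
        cases h : ts.any (fun t => PySem.Str.isIn t nl || PySem.Str.isIn t dl) <;> simp
      | some b =>
        by_cases hlt : i < b.1
        · simp only [pvStep, hm, hlt, decide_true, Bool.true_and, Bool.true_or, reduceIte, ih]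
          cases h : ts.any (fun t => PySem.Str.isIn t nl || PySem.Str.isIn t dl) <;> simp
        · simp only [pvStep, hm, hlt, decide_false, Bool.and_false, Bool.true_or, reduceIte, ih]
          simp [hlt]
    · rw [Bool.not_eq_true] at hm
      simp only [pvStep, hm, Bool.false_and, Bool.false_or, ih]
      simp

-- the flat table is the concatenation of its seven constant-priority blocks
lemma pvKeywords_eq : pvKeywords =
    (["price", "quote", "ohlcv", "market", "stock", "equity", "trading"].map (fun t => (0, "market_data", t))) ++
    (["rsi", "sma", "ema", "macd", "bollinger", "stochastic", "indicator", "technical"].map (fun t => (1, "technical_analysis", t))) ++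
    (["earnings", "revenue", "balance", "income", "cash", "financial", "statement"].map (fun t => (2, "fundamentals", t))) ++
    (["news", "sentiment", "social", "article", "headline", "buzz"].map (fun t => (3, "sentiment", t))) ++
    (["forex", "currency", "exchange", "fx"].map (fun t => (4, "forex", t))) ++
    (["crypto", "bitcoin", "ethereum", "blockchain", "digital"].map (fun t => (5, "cryptocurrency", t))) ++
    (["option", "call", "put", "strike", "expiry", "volatility"].map (fun t => (6, "options", t))) := rfl

-- ===== VERDICT (by name: the statement is the Claim_ definition above) =====
set_option maxHeartbeats 1600000 in
theorem infer_tool_category_py_spec : Claim_equal_infer_tool_category_py := by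
  intro tool_name description _
  unfold Spec_infer_tool_category_py
  simp only [infer_tool_category_py, infer_tool_category_py_alt]
  rw [pvKeywords_eq]
  repeat rw [List.foldl_append]
  repeat rw [pvBlock]
  by_cases h0 : (["price", "quote", "ohlcv", "market", "stock", "equity", "trading"] : List String).any
      (fun term => PySem.Str.isIn term (PySem.Str.lower tool_name) || PySem.Str.isIn term (PySem.Str.lower description)) = true <;>
  by_cases h1 : (["rsi", "sma", "ema", "macd", "bollinger", "stochastic", "indicator", "technical"] : List String).any
      (fun term => PySem.Str.isIn term (PySem.Str.lower tool_name) || PySem.Str.isIn term (PySem.Str.lower description)) = true <;>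
  by_cases h2 : (["earnings", "revenue", "balance", "income", "cash", "financial", "statement"] : List String).any
      (fun term => PySem.Str.isIn term (PySem.Str.lower tool_name) || PySem.Str.isIn term (PySem.Str.lower description)) = true <;>
  by_cases h3 : (["news", "sentiment", "social", "article", "headline", "buzz"] : List String).any
      (fun term => PySem.Str.isIn term (PySem.Str.lower tool_name) || PySem.Str.isIn term (PySem.Str.lower description)) = true <;>
  by_cases h4 : (["forex", "currency", "exchange", "fx"] : List String).any
      (fun term => PySem.Str.isIn term (PySem.Str.lower tool_name) || PySem.Str.isIn term (PySem.Str.lower description)) = true <;>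
  by_cases h5 : (["crypto", "bitcoin", "ethereum", "blockchain", "digital"] : List String).any
      (fun term => PySem.Str.isIn term (PySem.Str.lower tool_name) || PySem.Str.isIn term (PySem.Str.lower description)) = true <;>
  by_cases h6 : (["option", "call", "put", "strike", "expiry", "volatility"] : List String).any
      (fun term => PySem.Str.isIn term (PySem.Str.lower tool_name) || PySem.Str.isIn term (PySem.Str.lower description)) = true <;>
  simp only [h0, h1, h2, h3, h4, h5, h6, if_true] <;> rfl
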